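-- pv_equiv track=rewrite | github.com/glopez21/logsentry | output/advanced.py | score_records
-- ===== SOURCE A (Python) =====
-- SEVERITY_MAP = {
--     "critical": [
--         "priv_esc", "Privilege escalation", "lateral_movement detected", "data_exfiltration",
--         "dcsync", "pass the hash", "golden ticket", "root account", "etc/shadow"
--     ],
--     "high": [
--         "brute force", "max authentication attempts", "exceed", "credential_stuffing",
--         "mitm", "man-in-the-middle", "arp spoofing", "ssl strip", "data exfiltration",
--         "root password", "password reset for root", "sudoers"
--     ],
--     "medium": [
--         "failed password", "failed login", "invalid user", "authentication failure",
--         "port scan", "suspicious process", "process injection", "registry",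
--         "high cpu", "outbound connection", "unexpected"
--     ],
--     "low": [
--         "session open", "session close", "disconnect", "new session",
--         "password changed", "cron job", "accepted password"
--     ],
--     "info": [
--         "normal", "heartbeat", "keepalive", "connection", "timeout"
--     ]
-- }
--
-- def get_severity(event_type: str = "", message: str = "") -> str:
--     """Determine severity level for an event."""
--     event_type = event_type.lower()
--     message = message.lower()
--     combined = f"{event_type} {message}"
--
--     for severity, patterns in SEVERITY_MAP.items():
--         for pattern in patterns:
--             if pattern.lower() in combined:
--                 return severity
--
--     return "info"
--
-- def score_records(records: list[dict]) -> list[dict]: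
--     """Add severity scores to all records."""
--     scored = []
--     for r in records:
--         event_type = r.get("event_type", "")
--         message = r.get("raw_message", "") or r.get("message", "")
--         severity = get_severity(event_type, message)
--         r["severity"] = severity
--         scored.append(r)
--     return scored
-- ===== SOURCE B (Python) =====
-- SEVERITY_MAP = {
--     "critical": [
--         "priv_esc", "Privilege escalation", "lateral_movement detected", "data_exfiltration",
--         "dcsync", "pass the hash", "golden ticket", "root account", "etc/shadow"
--     ],
--     "high": [
--         "brute force", "max authentication attempts", "exceed", "credential_stuffing",
--         "mitm", "man-in-the-middle", "arp spoofing", "ssl strip", "data exfiltration",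
--         "root password", "password reset for root", "sudoers"
--     ],
--     "medium": [
--         "failed password", "failed login", "invalid user", "authentication failure",
--         "port scan", "suspicious process", "process injection", "registry",
--         "high cpu", "outbound connection", "unexpected"
--     ],
--     "low": [
--         "session open", "session close", "disconnect", "new session",
--         "password changed", "cron job", "accepted password"
--     ],
--     "info": [
--         "normal", "heartbeat", "keepalive", "connection", "timeout"
--     ]
-- }
--
-- # Different algorithm: flatten the severity dict once into a flat table of
-- # (lowercased pattern, severity rank); per record, compute the MINIMUM rank over
-- # ALL matching patterns in one flat scan (no nested first-match loops, no early
-- # return), then translate the rank back to its severity name.  Correct because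
-- # every pattern of one severity carries the same rank, and the first severity in
-- # dict order containing a match is exactly the severity of minimal rank among
-- # all matching patterns.
-- _SEVERITIES = list(SEVERITY_MAP)
-- _FLAT = []
-- for _rank, _pats in enumerate(SEVERITY_MAP.values()):
--     for _p in _pats:
--         _FLAT.append((_p.lower(), _rank))
--
--
-- def score_records(records: list[dict]) -> list[dict]:
--     """Add severity scores to all records (mutates the record dicts in place)."""
--     for r in records:
--         combined = (r.get("event_type", "").lower() + " "
--                     + (r.get("raw_message") or r.get("message") or "").lower())
--         best = len(_SEVERITIES)
--         for pat, rank in _FLAT: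
--             if rank < best:
--                 if pat in combined:
--                     best = rank
--         r["severity"] = _SEVERITIES[best] if best < len(_SEVERITIES) else "info"
--     return records
-- ===== Notes on version B (the rewrite author's own statement) =====
-- stated objective: alternative
-- what changed: Replaces the nested first-match loops over the severity dict by a flat table of (lowercased pattern, severity rank) built once; each record gets the minimum rank over all matching patterns in one flat scan, which is mapped back to the severity name (first severity with a match = minimal matching rank).
import Mathlib
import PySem

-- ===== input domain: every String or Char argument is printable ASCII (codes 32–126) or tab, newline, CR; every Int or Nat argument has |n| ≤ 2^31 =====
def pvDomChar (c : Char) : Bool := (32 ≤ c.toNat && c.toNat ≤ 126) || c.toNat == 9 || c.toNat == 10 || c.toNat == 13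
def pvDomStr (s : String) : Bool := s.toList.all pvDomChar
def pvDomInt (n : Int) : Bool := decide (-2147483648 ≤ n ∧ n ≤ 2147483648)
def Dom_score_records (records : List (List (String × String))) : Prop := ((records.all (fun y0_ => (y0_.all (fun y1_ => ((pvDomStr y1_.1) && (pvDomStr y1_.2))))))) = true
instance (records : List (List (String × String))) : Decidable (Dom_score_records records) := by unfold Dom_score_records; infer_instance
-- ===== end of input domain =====

-- B replaces A's nested first-match loops by a flat (lowercased pattern, rank) table and a
-- per-record minimum-rank scan; equivalence is about the RETURN value (both Pythons also
-- mutate the record dicts identically in place).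

-- ===== PORT A =====
def pvSevMap : List (String × List String) := [
  ("critical", ["priv_esc", "Privilege escalation", "lateral_movement detected", "data_exfiltration",
    "dcsync", "pass the hash", "golden ticket", "root account", "etc/shadow"]),
  ("high", ["brute force", "max authentication attempts", "exceed", "credential_stuffing",
    "mitm", "man-in-the-middle", "arp spoofing", "ssl strip", "data exfiltration",
    "root password", "password reset for root", "sudoers"]),
  ("medium", ["failed password", "failed login", "invalid user", "authentication failure",
    "port scan", "suspicious process", "process injection", "registry",
    "high cpu", "outbound connection", "unexpected"]),
  ("low", ["session open", "session close", "disconnect", "new session",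
    "password changed", "cron job", "accepted password"]),
  ("info", ["normal", "heartbeat", "keepalive", "connection", "timeout"])]

-- inner 'for pattern in patterns: if pattern.lower() in combined: return severity'
def pvPatLoop (combined severity : String) : List String → Option String
  | [] => none
  | p :: ps => if PySem.Str.isIn (PySem.Str.lower p) combined then some severity
               else pvPatLoop combined severity ps

-- outer 'for severity, patterns in SEVERITY_MAP.items(): …'
def pvSevLoop (combined : String) : List (String × List String) → Option String
  | [] => none
  | (sev, pats) :: rest =>
      match pvPatLoop combined sev pats with
      | some s => some s
      | none => pvSevLoop combined rest

def get_severity (event_type message : String) : String :=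
  let event_type := PySem.Str.lower event_type
  let message := PySem.Str.lower message
  let combined := event_type ++ " " ++ message
  (pvSevLoop combined pvSevMap).getD "info"

def score_records (records : List (List (String × String))) : List (List (String × String)) :=
  records.foldl (fun scored r =>
    let event_type := PySem.Dict.getD (PySem.Dict.mk r) "event_type" ""
    let message :=
      let rm := PySem.Dict.getD (PySem.Dict.mk r) "raw_message" ""
      if rm = "" then PySem.Dict.getD (PySem.Dict.mk r) "message" "" else rm
    let severity := get_severity event_type message
    let r' := (PySem.Dict.insert (PySem.Dict.mk r) "severity" severity).items
    scored ++ [r']) []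

-- ===== PORT B =====
-- _SEVERITIES = list(SEVERITY_MAP)
def pvNames : List String := pvSevMap.map Prod.fst

-- _FLAT: the 'for _rank, _pats in enumerate(SEVERITY_MAP.values()): for _p in _pats: append((_p.lower(), _rank))' loop
def pvFlatFrom (i : Nat) : List (List String) → List (String × Nat)
  | [] => []
  | pats :: rest => pats.map (fun p => (PySem.Str.lower p, i)) ++ pvFlatFrom (i + 1) rest

def pvFlat : List (String × Nat) := pvFlatFrom 0 (pvSevMap.map Prod.snd)

-- 'if rank < best: if pat in combined: best = rank'
def pvStep (combined : String) (best : Nat) (pr : String × Nat) : Nat :=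
  if pr.2 < best then (if PySem.Str.isIn pr.1 combined then pr.2 else best) else best

-- r.get("raw_message") or r.get("message") or ""
def pvMsgB (r : List (String × String)) : String :=
  let m2 := match PySem.Dict.get? (PySem.Dict.mk r) "message" with
            | some s => if s = "" then "" else s
            | none => ""
  match PySem.Dict.get? (PySem.Dict.mk r) "raw_message" with
  | some s => if s = "" then m2 else s
  | none => m2

def score_records_alt (records : List (List (String × String))) : List (List (String × String)) :=
  records.map (fun r =>
    let combined := PySem.Str.lower (PySem.Dict.getD (PySem.Dict.mk r) "event_type" "") ++ " "
                      ++ PySem.Str.lower (pvMsgB r)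
    let best := pvFlat.foldl (pvStep combined) pvNames.length
    let sev := if best < pvNames.length then pvNames.getD best "info" else "info"
    (PySem.Dict.insert (PySem.Dict.mk r) "severity" sev).items)

-- ===== PRECONDITION & SPEC =====
def Spec_score_records (records : List (List (String × String))) (out : List (List (String × String))) : Prop := out = score_records_alt records
instance (records : List (List (String × String))) (out : List (List (String × String))) : Decidable (Spec_score_records records out) := by unfold Spec_score_records; infer_instance

-- ===== CLAIM (what is proved, stated in full; the proofs are below) =====
def Claim_equal_score_records : Prop := ∀ (records : List (List (String × String))), Dom_score_records records → Spec_score_records records (score_records records)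

-- ===== LEMMAS AND PROOFS =====

-- index of the first severity block (of a list of pattern lists) containing a match
def pvFirstHit (c : String) : List (List String) → Option Nat
  | [] => none
  | pats :: rest =>
      if pats.any (fun p => PySem.Str.isIn (PySem.Str.lower p) c) then some 0
      else (pvFirstHit c rest).map (· + 1)

theorem pvFirstHit_lt (c : String) (m : List (List String)) (j : Nat)
    (h : pvFirstHit c m = some j) : j < m.length := by
  induction m generalizing j with
  | nil => simp [pvFirstHit] at h
  | cons pats rest ih =>
    rw [pvFirstHit] at h
    split at h
    · cases h; simp
    · cases hr : pvFirstHit c rest with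
      | none => rw [hr] at h; simp at h
      | some k =>
        rw [hr] at h; simp at h
        subst h
        exact Nat.succ_lt_succ (ih k hr)

-- fold over one severity block, rank below the running best
theorem pvFold_block (c : String) (i b : Nat) (pats : List String) :
    (pats.map (fun p => (PySem.Str.lower p, i))).foldl (pvStep c) b =
      if i < b ∧ pats.any (fun p => PySem.Str.isIn (PySem.Str.lower p) c) then i else b := by
  induction pats generalizing b with
  | nil => by_cases h : i < b <;> simp [h]
  | cons p ps ih =>
    simp only [List.map_cons, List.foldl_cons, pvStep]
    by_cases hb : i < b
    · simp only [if_pos hb]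
      cases hm : PySem.Str.isIn (PySem.Str.lower p) c
      · rw [if_neg (by simp), ih b, List.any_cons, hm]
        simp [hb]
      · rw [if_pos rfl, ih i, List.any_cons, hm]
        simp [hb]
    · simp only [if_neg hb]
      rw [ih b]
      simp [hb]
  
-- fold over the flat table: the minimum matching rank is the first hit (ranks are nondecreasing)
theorem pvFold_flat (c : String) (m : List (List String)) (i b : Nat)
    (hb : i + m.length ≤ b) :
    (pvFlatFrom i m).foldl (pvStep c) b =
      match pvFirstHit c m with
      | some j => i + j
      | none => b := by
  induction m generalizing i b with
  | nil => simp [pvFlatFrom, pvFirstHit]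
  | cons pats rest ih =>
    rw [pvFlatFrom, List.foldl_append, pvFold_block, pvFirstHit]
    simp only [List.length_cons] at hb
    have hib : i < b := by omega
    cases hm : pats.any (fun p => PySem.Str.isIn (PySem.Str.lower p) c)
    · rw [if_neg (by simp), if_neg (by simp)]
      rw [ih (i + 1) b (by omega)]
      cases hr : pvFirstHit c rest
      · simp
      · simp
        ring
    · rw [if_pos ⟨hib, rfl⟩, if_pos rfl]
      -- after the hit, every later rank is ≥ i+1 > i, so the fold stays at i
      have stay : ∀ (m' : List (List String)) (k : Nat), i < k →
          (pvFlatFrom k m').foldl (pvStep c) i = i := by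
        intro m'
        induction m' with
        | nil => intro k _; simp [pvFlatFrom]
        | cons q qs ihq =>
          intro k hk
          rw [pvFlatFrom, List.foldl_append, pvFold_block,
              if_neg (by intro hc; omega)]
          exact ihq (k + 1) (by omega)
      exact (stay rest (i + 1) (by omega)).symm ▸ rfl

-- A's nested loops return the name of the first severity block with a match
theorem pvSevLoop_firstHit (c : String) (m : List (String × List String)) :
    pvSevLoop c m =
      (pvFirstHit c (m.map Prod.snd)).map (fun j => (m.map Prod.fst).getD j "info") := by
  induction m with
  | nil => simp [pvSevLoop, pvFirstHit]
  | cons sp rest ih =>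
    obtain ⟨sev, pats⟩ := sp
    rw [pvSevLoop, List.map_cons, List.map_cons, pvFirstHit]
    have hpl : pvPatLoop c sev pats =
        if pats.any (fun p => PySem.Str.isIn (PySem.Str.lower p) c) then some sev else none := by
      induction pats with
      | nil => simp [pvPatLoop]
      | cons p ps ihp =>
        rw [pvPatLoop, ihp, List.any_cons]
        cases PySem.Str.isIn (PySem.Str.lower p) c <;>
          cases ps.any (fun p => PySem.Str.isIn (PySem.Str.lower p) c) <;> rfl
    rw [hpl]
    cases hm : pats.any (fun p => PySem.Str.isIn (PySem.Str.lower p) c)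
    · rw [if_neg (by simp), if_neg (by simp), ih]
      cases hr : pvFirstHit c (rest.map Prod.snd) <;> simp
    · rw [if_pos rfl, if_pos rfl]; rfl

-- the per-record severities agree, for any combined string
theorem pvSev_eq (c : String) :
    (pvSevLoop c pvSevMap).getD "info" =
      (let best := pvFlat.foldl (pvStep c) pvNames.length
       if best < pvNames.length then pvNames.getD best "info" else "info") := by
  have hlen : pvNames.length = (pvSevMap.map Prod.snd).length := by
    simp [pvNames]
  rw [pvSevLoop_firstHit]
  show _ = (if pvFlat.foldl (pvStep c) pvNames.length < pvNames.length then _ else _)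
  rw [pvFlat, hlen, pvFold_flat c (pvSevMap.map Prod.snd) 0 _ (by omega)]
  cases hr : pvFirstHit c (pvSevMap.map Prod.snd) with
  | none => simp
  | some j =>
    have hj : j < (pvSevMap.map Prod.snd).length := pvFirstHit_lt c _ j hr
    simp only [Option.map_some, Option.getD_some, Nat.zero_add]
    rw [if_pos hj]
    simp [pvNames]

theorem pvMsgB_eq (r : List (String × String)) :
    pvMsgB r =
      (let rm := PySem.Dict.getD (PySem.Dict.mk r) "raw_message" ""
       if rm = "" then PySem.Dict.getD (PySem.Dict.mk r) "message" "" else rm) := by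
  simp only [pvMsgB, PySem.Dict.getD]
  cases h1 : PySem.Dict.get? (PySem.Dict.mk r) "raw_message" <;>
    cases h2 : PySem.Dict.get? (PySem.Dict.mk r) "message" <;>
    simp <;> split <;> simp_all

theorem pvRecord_eq (r : List (String × String)) :
    (let event_type := PySem.Dict.getD (PySem.Dict.mk r) "event_type" ""
     let message :=
       let rm := PySem.Dict.getD (PySem.Dict.mk r) "raw_message" ""
       if rm = "" then PySem.Dict.getD (PySem.Dict.mk r) "message" "" else rm
     let severity := get_severity event_type message
     (PySem.Dict.insert (PySem.Dict.mk r) "severity" severity).items) =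
    (let combined := PySem.Str.lower (PySem.Dict.getD (PySem.Dict.mk r) "event_type" "") ++ " "
                       ++ PySem.Str.lower (pvMsgB r)
     let best := pvFlat.foldl (pvStep combined) pvNames.length
     let sev := if best < pvNames.length then pvNames.getD best "info" else "info"
     (PySem.Dict.insert (PySem.Dict.mk r) "severity" sev).items) := by
  simp only [get_severity, pvMsgB_eq, pvSev_eq]

theorem pvFoldl_eq_map (rs : List (List (String × String))) (acc : List (List (String × String))) :
    rs.foldl (fun scored r =>
      let event_type := PySem.Dict.getD (PySem.Dict.mk r) "event_type" ""
      let message :=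
        let rm := PySem.Dict.getD (PySem.Dict.mk r) "raw_message" ""
        if rm = "" then PySem.Dict.getD (PySem.Dict.mk r) "message" "" else rm
      let severity := get_severity event_type message
      let r' := (PySem.Dict.insert (PySem.Dict.mk r) "severity" severity).items
      scored ++ [r']) acc
    = acc ++ rs.map (fun r =>
        let combined := PySem.Str.lower (PySem.Dict.getD (PySem.Dict.mk r) "event_type" "") ++ " "
                          ++ PySem.Str.lower (pvMsgB r)
        let best := pvFlat.foldl (pvStep combined) pvNames.length
        let sev := if best < pvNames.length then pvNames.getD best "info" else "info"
        (PySem.Dict.insert (PySem.Dict.mk r) "severity" sev).items) := by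
  induction rs generalizing acc with
  | nil => simp
  | cons r rs ih =>
    simp only [List.foldl_cons, List.map_cons, ih]
    rw [pvRecord_eq r]
    simp

-- ===== VERDICT (by name: the statement is the Claim_ definition above) =====
theorem score_records_spec : Claim_equal_score_records := by
  intro records _
  show score_records records = score_records_alt records
  simp only [score_records, score_records_alt, pvFoldl_eq_map, List.nil_append]
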